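-- pv_equiv track=rewrite | github.com/tjuillac-cmd/BILL-2026 | VCFannotate/variant_annotator.py | get_location_type
-- ===== SOURCE A (Python) =====
-- from typing import List, Dict, Optional, Tuple
--
-- def get_location_type(variant: Dict) -> str:
--     """Determine location type from genes"""
--     if not variant['genes']:
--         return 'intergenic'
--
--     types = [g['type'] for g in variant['genes']]
--     if 'CDS' in types:
--         return 'coding'
--     elif 'exon' in types:
--         return 'exon'
--     elif 'gene' in types:
--         return 'gene'
--     else:
--         return 'genic'
-- ===== SOURCE B (Python) =====
-- def get_location_type(variant):
--     """Determine location type from genes"""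
--     genes = variant['genes']
--     if not genes:
--         return 'intergenic'
--     rank = {'CDS': 3, 'exon': 2, 'gene': 1}
--     best = max(rank.get(g['type'], 0) for g in genes)
--     return ('genic', 'gene', 'exon', 'coding')[best]
-- ===== Notes on version B (the rewrite author's own statement) =====
-- stated objective: alternative
-- what changed: Replaces the build-a-types-list-then-priority-ordered-membership-tests logic by a numeric-priority reduction: each gene type is mapped to a rank, the maximum rank is taken in one reduction, and the answer is decoded from a lookup table indexed by that maximum.
import Mathlib
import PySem

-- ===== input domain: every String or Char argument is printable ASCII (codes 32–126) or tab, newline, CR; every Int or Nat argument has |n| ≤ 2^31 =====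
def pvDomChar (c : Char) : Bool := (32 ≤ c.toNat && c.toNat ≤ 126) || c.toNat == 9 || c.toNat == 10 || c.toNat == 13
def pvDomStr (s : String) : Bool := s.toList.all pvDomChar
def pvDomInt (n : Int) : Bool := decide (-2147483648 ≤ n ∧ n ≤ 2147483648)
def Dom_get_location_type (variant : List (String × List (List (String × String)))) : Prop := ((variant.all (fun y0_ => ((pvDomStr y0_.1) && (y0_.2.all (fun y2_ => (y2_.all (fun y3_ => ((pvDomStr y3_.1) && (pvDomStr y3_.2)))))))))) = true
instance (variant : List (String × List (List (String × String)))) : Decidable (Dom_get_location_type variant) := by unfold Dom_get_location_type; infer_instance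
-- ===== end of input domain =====

-- B replaces A's types-list plus priority-ordered membership tests by a numeric-priority
-- reduction (max of ranks) decoded through a lookup table (objective: alternative).

-- ===== PORT A =====
-- variant['genes'] / g['type'] : first-match lookup; on a missing key Python raises
-- KeyError — those inputs are outside Pre_, so the default [] / "" is never reached there.
def get_location_type (variant : List (String × List (List (String × String)))) : String :=
  let genes := PySem.Dict.getD (PySem.Dict.mk variant) "genes" []
  if genes.isEmpty then "intergenic"
  else
    let types := genes.map (fun g => PySem.Dict.getD (PySem.Dict.mk g) "type" "")
    if types.contains "CDS" then "coding"
    else if types.contains "exon" then "exon"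
    else if types.contains "gene" then "gene"
    else "genic"

-- ===== PORT B =====
-- rank.get(g['type'], 0)  (g['type'] raising KeyError when missing is outside Pre_)
def pvRank (g : List (String × String)) : Int :=
  PySem.Dict.getD (PySem.Dict.mk [("CDS", (3 : Int)), ("exon", 2), ("gene", 1)])
    (PySem.Dict.getD (PySem.Dict.mk g) "type" "") 0

def get_location_type_alt (variant : List (String × List (List (String × String)))) : String :=
  let genes := PySem.Dict.getD (PySem.Dict.mk variant) "genes" []
  match genes with
  | [] => "intergenic"                                   -- 'if not genes: return "intergenic"'
  | g0 :: gs =>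
    -- max(rank.get(g['type'], 0) for g in genes): fold of max starting at the first element
    let best := gs.foldl (fun m g => max m (pvRank g)) (pvRank g0)
    -- ('genic', 'gene', 'exon', 'coding')[best] : tuple indexing (best is always in range)
    (PySem.List.pyGet? ["genic", "gene", "exon", "coding"] best).getD ""

-- ===== PRECONDITION & SPEC =====
-- Pre_ excludes exactly the inputs where A raises KeyError: a variant dict without a
-- 'genes' key, or a gene dict without a 'type' key.
def Pre_get_location_type (variant : List (String × List (List (String × String)))) : Prop :=
  (match PySem.Dict.get? (PySem.Dict.mk variant) "genes" with
   | none => false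
   | some gs => gs.all (fun g => (PySem.Dict.get? (PySem.Dict.mk g) "type").isSome)) = true
instance (variant : List (String × List (List (String × String)))) : Decidable (Pre_get_location_type variant) := by unfold Pre_get_location_type; infer_instance

def pvWitness_get_location_type : (List (String × List (List (String × String)))) :=
  [("genes", [[("type", "exon")], [("type", "CDS")]])]

def Spec_get_location_type (variant : List (String × List (List (String × String)))) (out : String) : Prop := out = get_location_type_alt variant
instance (variant : List (String × List (List (String × String)))) (out : String) : Decidable (Spec_get_location_type variant out) := by unfold Spec_get_location_type; infer_instance

-- ===== CLAIM (what is proved, stated in full; the proofs are below) =====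
def Claim_equal_get_location_type : Prop := ∀ (variant : List (String × List (List (String × String)))), Dom_get_location_type variant → Pre_get_location_type variant → Spec_get_location_type variant (get_location_type variant)

-- ===== LEMMAS AND PROOFS =====

def pvType (g : List (String × String)) : String :=
  PySem.Dict.getD (PySem.Dict.mk g) "type" ""

theorem rank_eq (g : List (String × String)) :
    pvRank g = if pvType g = "CDS" then 3 else if pvType g = "exon" then 2
               else if pvType g = "gene" then 1 else 0 := by
  unfold pvRank pvType
  set t := PySem.Dict.getD (PySem.Dict.mk g) "type" "" with ht
  by_cases h1 : t = "CDS"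
  · simp [PySem.Dict.getD, PySem.Dict.get?, h1]
  · by_cases h2 : t = "exon"
    · simp [PySem.Dict.getD, PySem.Dict.get?, h2]
    · by_cases h3 : t = "gene"
      · simp [PySem.Dict.getD, PySem.Dict.get?, h3]
      · simp [PySem.Dict.getD, PySem.Dict.get?, beq_iff_eq, h1, h2, h3,
              Ne.symm h1, Ne.symm h2, Ne.symm h3]

theorem rank_nonneg (g : List (String × String)) : 0 ≤ pvRank g := by
  rw [rank_eq]; split_ifs <;> norm_num

-- pull an accumulator out of the max-fold
theorem foldl_max_acc (l : List (List (String × String))) (a : Int) (ha : 0 ≤ a) :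
    l.foldl (fun m g => max m (pvRank g)) a
      = max a (l.foldl (fun m g => max m (pvRank g)) 0) := by
  induction l generalizing a with
  | nil => simpa using (max_eq_left ha).symm
  | cons g gs ih =>
    simp only [List.foldl_cons]
    rw [ih (max a (pvRank g)) (le_trans ha (le_max_left _ _)),
        ih (max 0 (pvRank g)) (le_max_left _ _)]
    rw [max_eq_right (rank_nonneg g), max_assoc]

-- the max of the ranks is the priority of the winning branch of A's chain
theorem maxRank_spec (l : List (List (String × String))) :
    l.foldl (fun m g => max m (pvRank g)) 0
      = (if l.any (fun g => pvType g == "CDS") then 3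
         else if l.any (fun g => pvType g == "exon") then 2
         else if l.any (fun g => pvType g == "gene") then 1 else 0) := by
  induction l with
  | nil => simp
  | cons g gs ih =>
    simp only [List.foldl_cons]
    rw [foldl_max_acc gs _ (le_max_left _ _), ih,
        max_eq_right (rank_nonneg g), rank_eq]
    simp only [List.any_cons]
    by_cases h1 : pvType g = "CDS"
    · simp [h1]; split_ifs <;> norm_num
    · by_cases h2 : pvType g = "exon"
      · simp [h2]; split_ifs <;> norm_num
      · by_cases h3 : pvType g = "gene"
        · simp [h3]; split_ifs <;> norm_num
        · simp [h1, h2, h3]; split_ifs <;> norm_num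

theorem contains_map_any (genes : List (List (String × String))) (s : String) :
    (genes.map (fun g => pvType g)).contains s
      = genes.any (fun g => pvType g == s) := by
  induction genes with
  | nil => simp
  | cons g gs ih =>
    simp only [List.map_cons, List.contains_cons, List.any_cons, ih]
    rw [Bool.beq_comm]

theorem foldl_from_head (g0 : List (String × String)) (gs : List (List (String × String))) :
    gs.foldl (fun m g => max m (pvRank g)) (pvRank g0)
      = (g0 :: gs).foldl (fun m g => max m (pvRank g)) 0 := by
  simp only [List.foldl_cons, max_eq_right (rank_nonneg g0)]

-- ===== VERDICT (by name: the statement is the Claim_ definition above) =====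
theorem get_location_type_spec : Claim_equal_get_location_type := by
  intro variant _ _
  unfold Spec_get_location_type get_location_type get_location_type_alt
  simp only []
  set genes := PySem.Dict.getD (PySem.Dict.mk variant) "genes" [] with hg
  match genes with
  | [] => simp
  | g0 :: gs =>
    simp only [List.isEmpty_cons, Bool.false_eq_true, if_false]
    rw [foldl_from_head g0 gs, maxRank_spec]
    show (if ((g0 :: gs).map (fun g => pvType g)).contains "CDS" then "coding"
          else if ((g0 :: gs).map (fun g => pvType g)).contains "exon" then "exon"
          else if ((g0 :: gs).map (fun g => pvType g)).contains "gene" then "gene"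
          else "genic") = _
    rw [contains_map_any, contains_map_any, contains_map_any]
    by_cases h1 : (g0 :: gs).any (fun g => pvType g == "CDS")
    · simp [h1, PySem.List.pyGet?, PySem.List.pyIdx?]
    · by_cases h2 : (g0 :: gs).any (fun g => pvType g == "exon")
      · simp [h1, h2, PySem.List.pyGet?, PySem.List.pyIdx?]
      · by_cases h3 : (g0 :: gs).any (fun g => pvType g == "gene")
        · simp [h1, h2, h3, PySem.List.pyGet?, PySem.List.pyIdx?]
        · simp [h1, h2, h3, PySem.List.pyGet?, PySem.List.pyIdx?]
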